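-- pv_equiv track=rewrite | github.com/TomSavard/RNA_Triplets | code/python/utilities.py | parseSS
-- ===== SOURCE A (Python) =====
-- def parseSS(struct):
--     """
--     Parse the secondary structure of the RNA sequence
--
--     Args:
--         struct (string): secondary structure of the RNA sequence
--
--     Returns:
--         tuple: list of base-pairs and length of the string
--     """
--     l = []
--     n = len(struct)
--     last_index = n-1
--     for i in range(n):
--         if struct[i] == "(":
--             for j in range(last_index,i,-1):
--                 if struct[j] == ")":
--                     l.append((i,j))
--                     last_index = j-1
--                     break
--     return (l,n)
-- ===== SOURCE B (Python) =====
-- def parseSS(struct):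
--     """
--     Parse the secondary structure of the RNA sequence (index-table version).
--
--     Collect the '(' positions ascending and the ')' positions descending,
--     then pair them with one zip pass, stopping at the first crossing.
--     """
--     opens = [i for i, ch in enumerate(struct) if ch == "("]
--     closes = [i for i, ch in enumerate(struct) if ch == ")"]
--     closes.reverse()
--     l = []
--     for o, c in zip(opens, closes):
--         if o >= c:
--             break
--         l.append((o, c))
--     return (l, len(struct))
-- ===== Notes on version B (the rewrite author's own statement) =====
-- stated objective: alternative
-- what changed: Replaces the nested forward/backward scans with a shrinking boundary by two index-collection passes and a single zip pass that pairs opens (ascending) with closes (descending) until the first crossing.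
import Mathlib
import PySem

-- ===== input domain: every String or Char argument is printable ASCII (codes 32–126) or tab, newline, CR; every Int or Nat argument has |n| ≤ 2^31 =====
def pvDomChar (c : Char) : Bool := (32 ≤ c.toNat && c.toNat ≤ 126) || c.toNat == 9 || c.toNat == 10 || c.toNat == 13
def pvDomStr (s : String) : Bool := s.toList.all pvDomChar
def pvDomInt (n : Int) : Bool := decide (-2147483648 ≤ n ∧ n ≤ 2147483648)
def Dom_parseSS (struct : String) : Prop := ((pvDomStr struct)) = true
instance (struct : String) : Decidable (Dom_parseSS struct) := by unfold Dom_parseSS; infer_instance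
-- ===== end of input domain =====

-- B replaces A's nested forward/backward scans by two index-collection passes and one zip pass (objective: alternative).

-- ===== PORT A =====
-- inner loop: 'for j in range(last_index, i, -1): if struct[j] == ")": … break'
def parseA_inner (cs : List Char) : List Int → Option Int
  | [] => none
  | j :: rest => if PySem.List.pyGet? cs j = some ')' then some j else parseA_inner cs rest

-- outer loop: 'for i in range(n)', state = (l, last_index)
def parseA_loop (cs : List Char) : List Int → List (Int × Int) → Int → List (Int × Int)
  | [], l, _ => l
  | i :: rest, l, lastIndex =>
    if PySem.List.pyGet? cs i = some '(' then
      match parseA_inner cs (PySem.List.pyRange lastIndex i (-1)) with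
      | some j => parseA_loop cs rest (l ++ [(i, j)]) (j - 1)
      | none => parseA_loop cs rest l lastIndex
    else parseA_loop cs rest l lastIndex

def parseSS (struct : String) : (List (Int × Int)) × Int :=
  let cs := struct.toList
  let n : Int := cs.length
  (parseA_loop cs (PySem.List.pyRange 0 n 1) [] (n - 1), n)

-- ===== PORT B =====
-- '[i for i, ch in enumerate(struct) if ch == x]'
def occIdx (cs : List Char) (x : Char) : List Int :=
  (PySem.List.enumerate cs 0).filterMap (fun p => if p.2 = x then some p.1 else none)

-- 'for o, c in zip(opens, closes): if o >= c: break; l.append((o, c))'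
def zipPairs : List (Int × Int) → List (Int × Int)
  | [] => []
  | (o, c) :: rest => if o ≥ c then [] else (o, c) :: zipPairs rest

def parseSS_alt (struct : String) : (List (Int × Int)) × Int :=
  let cs := struct.toList
  let opens := occIdx cs '('
  let closes := (occIdx cs ')').reverse
  (zipPairs (opens.zip closes), (cs.length : Int))

-- ===== PRECONDITION & SPEC =====
def Spec_parseSS (struct : String) (out : (List (Int × Int)) × Int) : Prop := out = parseSS_alt struct
instance (struct : String) (out : (List (Int × Int)) × Int) : Decidable (Spec_parseSS struct out) := by unfold Spec_parseSS; infer_instance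

-- ===== CLAIM (what is proved, stated in full; the proofs are below) =====
def Claim_equal_parseSS : Prop := ∀ (struct : String), Dom_parseSS struct → Spec_parseSS struct (parseSS struct)

-- ===== LEMMAS AND PROOFS =====

theorem mem_occIdx (cs : List Char) (x : Char) (j : Int) :
    j ∈ occIdx cs x ↔ ∃ (k : Nat) (h : k < cs.length), j = (k : Int) ∧ cs[k] = x := by
  unfold occIdx
  simp [List.mem_filterMap, PySem.List.mem_enumerate_iff]
  aesop

theorem occIdx_char (cs : List Char) (x : Char) (j : Int) (h0 : 0 ≤ j)
    (h1 : j < (cs.length : Int)) :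
    j ∈ occIdx cs x ↔ PySem.List.pyGet? cs j = some x := by
  have hn : j.toNat < cs.length := by omega
  rw [PySem.List.pyGet?_of_nonneg (h := h0), List.getElem?_eq_getElem hn, mem_occIdx]
  constructor
  · rintro ⟨k, hk, rfl, hx⟩
    simpa using hx
  · intro h
    exact ⟨j.toNat, hn, by omega, by simpa using h⟩

theorem pairwise_occIdx (cs : List Char) (x : Char) : (occIdx cs x).Pairwise (· < ·) := by
  unfold occIdx
  rw [List.pairwise_filterMap]
  apply (PySem.List.pairwise_lt_enumerate cs 0).imp_of_mem
  intro a b _ _ hab y hy z hz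
  split at hy <;> split at hz <;> simp_all

theorem dw_all_false (p : Int → Bool) (l : List Int) (h : ∀ y ∈ l, p y = false) :
    l.dropWhile p = l := by
  cases l with
  | nil => rfl
  | cons a t => rw [List.dropWhile_cons_of_neg (by simp [h a (by simp)])]

theorem dw_head_prop (p : Int → Bool) (l : List Int) (c : Int) (t : List Int)
    (h : l.dropWhile p = c :: t) : p c = false ∧ c ∈ l := by
  induction l with
  | nil => simp at h
  | cons a l ih =>
    by_cases hp : p a
    · rw [List.dropWhile_cons_of_pos hp] at h
      have := ih h
      exact ⟨this.1, List.mem_cons_of_mem _ this.2⟩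
    · rw [List.dropWhile_cons_of_neg hp] at h
      obtain ⟨rfl, rfl⟩ : a = c ∧ l = t := by simpa using h
      exact ⟨by simpa using hp, List.mem_cons_self⟩

theorem dw_desc_tail (D : List Int) (hD : D.Pairwise (· > ·)) (li c : Int) (t : List Int)
    (h : D.dropWhile (fun y => decide (li < y)) = c :: t) :
    D.dropWhile (fun y => decide (c - 1 < y)) = t := by
  induction D with
  | nil => simp at h
  | cons a D ih =>
    have hDt := hD.tail
    by_cases hp : li < a
    · rw [List.dropWhile_cons_of_pos (by simpa using hp)] at h
      have hc : c ∈ D := (dw_head_prop _ _ _ _ h).2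
      have hca : c < a := List.rel_of_pairwise_cons hD hc
      rw [List.dropWhile_cons_of_pos (by simp; omega)]
      exact ih hDt h
    · rw [List.dropWhile_cons_of_neg (by simpa using hp)] at h
      obtain ⟨rfl, rfl⟩ : a = c ∧ D = t := by simpa using h
      rw [List.dropWhile_cons_of_pos (by simp)]
      apply dw_all_false
      intro y hy
      have := List.rel_of_pairwise_cons hD hy
      simp; omega

theorem dw_desc_mem (D : List Int) (hD : D.Pairwise (· > ·)) (li : Int) (hm : li ∈ D) :
    ∃ t, D.dropWhile (fun y => decide (li < y)) = li :: t := by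
  induction D with
  | nil => simp at hm
  | cons a D ih =>
    by_cases hp : li < a
    · rw [List.dropWhile_cons_of_pos (by simpa using hp)]
      exact ih hD.tail (by rcases List.mem_cons.1 hm with rfl | h; omega; exact h)
    · rw [List.dropWhile_cons_of_neg (by simpa using hp)]
      rcases List.mem_cons.1 hm with rfl | h
      · exact ⟨D, rfl⟩
      · have := List.rel_of_pairwise_cons hD h; omega

theorem dw_desc_notmem (D : List Int) (li : Int) (hm : li ∉ D) :
    D.dropWhile (fun y => decide (li < y)) = D.dropWhile (fun y => decide (li - 1 < y)) := by
  induction D with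
  | nil => rfl
  | cons a D ih =>
    have hne : a ≠ li := fun h => hm (h ▸ List.mem_cons_self)
    by_cases hp : li < a
    · rw [List.dropWhile_cons_of_pos (by simpa using hp),
        List.dropWhile_cons_of_pos (by simp; omega)]
      exact ih (fun h => hm (List.mem_cons_of_mem _ h))
    · rw [List.dropWhile_cons_of_neg (by simpa using hp),
        List.dropWhile_cons_of_neg (by simp; omega)]

theorem dw_asc_mem (O : List Int) (hO : O.Pairwise (· < ·)) (k : Int) (hm : k ∈ O) :
    ∃ t, O.dropWhile (fun y => decide (y < k)) = k :: t ∧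
         t = O.dropWhile (fun y => decide (y < k + 1)) := by
  induction O with
  | nil => simp at hm
  | cons a O ih =>
    by_cases hp : a < k
    · rw [List.dropWhile_cons_of_pos (by simpa using hp),
        List.dropWhile_cons_of_pos (by simp; omega)]
      exact ih hO.tail (by rcases List.mem_cons.1 hm with rfl | h; omega; exact h)
    · rcases List.mem_cons.1 hm with rfl | h
      · rw [List.dropWhile_cons_of_neg (by simp only [decide_eq_true_eq]; exact hp),
          List.dropWhile_cons_of_pos (by simp)]
        refine ⟨O, rfl, (dw_all_false _ _ ?_).symm⟩
        intro y hy
        have := List.rel_of_pairwise_cons hO hy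
        simp; omega
      · have := List.rel_of_pairwise_cons hO h; omega

theorem dw_asc_notmem (O : List Int) (k : Int) (hm : k ∉ O) :
    O.dropWhile (fun y => decide (y < k)) = O.dropWhile (fun y => decide (y < k + 1)) := by
  induction O with
  | nil => rfl
  | cons a O ih =>
    have hne : a ≠ k := fun h => hm (h ▸ List.mem_cons_self)
    by_cases hp : a < k
    · rw [List.dropWhile_cons_of_pos (by simpa using hp),
        List.dropWhile_cons_of_pos (by simp; omega)]
      exact ih (fun h => hm (List.mem_cons_of_mem _ h))
    · rw [List.dropWhile_cons_of_neg (by simpa using hp),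
        List.dropWhile_cons_of_neg (by simp; omega)]

theorem pairwise_closes (cs : List Char) : ((occIdx cs ')').reverse).Pairwise (· > ·) := by
  rw [List.pairwise_reverse]
  exact pairwise_occIdx cs ')'

-- first element ≤ li of the descending close table, if any and above k
def headTest (k : Int) : List Int → Option Int
  | [] => none
  | c :: _ => if k < c then some c else none

-- inner loop = head test on the descending close table
theorem inner_eq (cs : List Char) : ∀ (m : Nat) (li k : Int), (li - k).toNat = m → 0 ≤ k →
    li ≤ (cs.length : Int) - 1 →
    parseA_inner cs (PySem.List.pyRange li k (-1)) =
      headTest k (((occIdx cs ')').reverse).dropWhile (fun y => decide (li < y))) := by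
  intro m
  induction m with
  | zero =>
    intro li k hm hk hn
    have hlk : li ≤ k := by omega
    rw [PySem.List.pyRange_neg_one_eq_nil hlk]
    cases hdw : ((occIdx cs ')').reverse).dropWhile (fun y => decide (li < y)) with
    | nil => rfl
    | cons c t =>
      have hc := dw_head_prop _ _ _ _ hdw
      have : c ≤ li := by simpa using hc.1
      simp only [parseA_inner, headTest]
      rw [if_neg (by omega)]
  | succ m ih =>
    intro li k hm hk hn
    have hkl : k < li := by omega
    rw [PySem.List.pyRange_neg_one_cons hkl]
    simp only [parseA_inner]
    by_cases hget : PySem.List.pyGet? cs li = some ')'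
    · rw [if_pos hget]
      have hmem : li ∈ (occIdx cs ')').reverse := by
        rw [List.mem_reverse]
        exact (occIdx_char cs ')' li (by omega) (by omega)).2 hget
      obtain ⟨t, ht⟩ := dw_desc_mem _ (pairwise_closes cs) li hmem
      rw [ht]
      simp only [headTest]
      rw [if_pos (by omega)]
    · rw [if_neg hget]
      have hnm : li ∉ (occIdx cs ')').reverse := by
        rw [List.mem_reverse]
        intro h
        exact hget ((occIdx_char cs ')' li (by omega) (by omega)).1 h)
      rw [dw_desc_notmem _ _ hnm]
      exact ih (li - 1) k (by omega) hk (by omega)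

theorem loop_main (cs : List Char) : ∀ (m : Nat) (k li : Int) (acc : List (Int × Int)),
    k = (cs.length : Int) - m → 0 ≤ k → li ≤ (cs.length : Int) - 1 →
    parseA_loop cs (PySem.List.pyRange k cs.length 1) acc li =
      acc ++ zipPairs (((occIdx cs '(').dropWhile (fun y => decide (y < k))).zip
        (((occIdx cs ')').reverse).dropWhile (fun y => decide (li < y)))) := by
  intro m
  induction m with
  | zero =>
    intro k li acc hm hk hn
    have hkn : k = (cs.length : Int) := by omega
    rw [PySem.List.pyRange_one_eq_nil (le_of_eq hkn.symm)]
    have hops : (occIdx cs '(').dropWhile (fun y => decide (y < k)) = [] := by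
      rw [List.dropWhile_eq_nil_iff]
      intro y hy
      obtain ⟨j, hj, rfl, _⟩ := (mem_occIdx cs '(' y).1 hy
      simp; omega
    simp [parseA_loop, hops, zipPairs]
  | succ m ih =>
    intro k li acc hm hk hn
    have hkn : k < (cs.length : Int) := by omega
    rw [PySem.List.pyRange_one_cons hkn]
    simp only [parseA_loop]
    by_cases hget : PySem.List.pyGet? cs k = some '('
    · rw [if_pos hget]
      have hmem : k ∈ occIdx cs '(' := (occIdx_char cs '(' k hk hkn).2 hget
      obtain ⟨t, ht, htt⟩ := dw_asc_mem _ (pairwise_occIdx cs '(') k hmem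
      rw [inner_eq cs (li - k).toNat li k rfl hk hn]
      cases hdw : ((occIdx cs ')').reverse).dropWhile (fun y => decide (li < y)) with
      | nil =>
        simp only [headTest]
        rw [ih (k + 1) li acc (by omega) (by omega) hn, hdw, ht]
        simp [zipPairs]
      | cons c t2 =>
        have hc := dw_head_prop _ _ _ _ hdw
        have hcli : c ≤ li := by simpa using hc.1
        simp only [headTest]
        by_cases hkc : k < c
        · rw [if_pos hkc]
          dsimp only
          rw [ih (k + 1) (c - 1) (acc ++ [(k, c)]) (by omega) (by omega) (by omega)]
          rw [dw_desc_tail _ (pairwise_closes cs) li c t2 hdw, ht, ← htt]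
          simp only [List.zip_cons_cons, zipPairs]
          rw [if_neg (by omega)]
          simp
        · rw [if_neg hkc]
          dsimp only
          rw [ih (k + 1) li acc (by omega) (by omega) hn, hdw, ht, ← htt]
          simp only [List.zip_cons_cons, zipPairs]
          rw [if_pos (by simp; omega)]
          cases htc : t with
          | nil => simp [zipPairs]
          | cons o t' =>
            have ho := dw_head_prop _ _ _ _ (htt.symm.trans htc)
            have hofalse : ¬ (o < k + 1) := by simpa using ho.1
            simp only [List.zip_cons_cons, zipPairs]
            rw [if_pos (by simp; omega)]
    · rw [if_neg hget]
      have hnm : k ∉ occIdx cs '(' := fun h =>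
        hget ((occIdx_char cs '(' k hk hkn).1 h)
      rw [dw_asc_notmem _ _ hnm]
      exact ih (k + 1) li acc (by omega) (by omega) hn

-- ===== VERDICT (by name: the statement is the Claim_ definition above) =====
theorem parseSS_spec : Claim_equal_parseSS := by
  intro struct _
  unfold Spec_parseSS parseSS parseSS_alt
  simp only []
  rw [loop_main struct.toList struct.toList.length 0 ((struct.toList.length : Int) - 1) []
    (by simp) (by omega) (by omega)]
  have h1 : (occIdx struct.toList '(').dropWhile (fun y => decide (y < 0)) =
      occIdx struct.toList '(' := by
    apply dw_all_false
    intro y hy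
    obtain ⟨j, hj, rfl, _⟩ := (mem_occIdx _ _ y).1 hy
    simp
  have h2 : ((occIdx struct.toList ')').reverse).dropWhile
      (fun y => decide ((struct.toList.length : Int) - 1 < y)) =
      (occIdx struct.toList ')').reverse := by
    apply dw_all_false
    intro y hy
    rw [List.mem_reverse] at hy
    obtain ⟨j, hj, rfl, _⟩ := (mem_occIdx _ _ y).1 hy
    have hlen : struct.toList.length = struct.length := by simp
    simp; omega
  rw [h1, h2]
  simp
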